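-- pv_equiv track=rewrite | github.com/msperber/bipartite | bipartite-py/source/topics/infer_topics_state.py | getNumTopicOccurencesInDoc
-- ===== SOURCE A (Python) =====
-- def getNumTopicOccurencesInDoc(topic, doc, tLArr,
--                                     excludeDocWordPositions=[]):
--     num = 0
--     for iteratingWordPos in range(len(tLArr[doc])):
--         if tLArr[doc][iteratingWordPos]==topic:
--             if (doc, iteratingWordPos) not in excludeDocWordPositions:
--                 num += 1
--     return num
-- ===== SOURCE B (Python) =====
-- def getNumTopicOccurencesInDoc(topic, doc, tLArr,
--                                     excludeDocWordPositions=[]):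
--     row = tLArr[doc]
--     total = sum(1 for x in row if x == topic)
--     n = len(row)
--     adjust = sum(1 for (d, p) in set(excludeDocWordPositions)
--                  if d == doc and 0 <= p < n and row[p] == topic)
--     return total - adjust
-- ===== Notes on version B (the rewrite author's own statement) =====
-- stated objective: alternative
-- what changed: B replaces A's single guarded index-scan (membership test on every topic hit) by inclusion-exclusion: count all topic occurrences in the row in one plain pass, then subtract the number of deduplicated exclusion entries that name a valid topic position of this doc.
import Mathlib
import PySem

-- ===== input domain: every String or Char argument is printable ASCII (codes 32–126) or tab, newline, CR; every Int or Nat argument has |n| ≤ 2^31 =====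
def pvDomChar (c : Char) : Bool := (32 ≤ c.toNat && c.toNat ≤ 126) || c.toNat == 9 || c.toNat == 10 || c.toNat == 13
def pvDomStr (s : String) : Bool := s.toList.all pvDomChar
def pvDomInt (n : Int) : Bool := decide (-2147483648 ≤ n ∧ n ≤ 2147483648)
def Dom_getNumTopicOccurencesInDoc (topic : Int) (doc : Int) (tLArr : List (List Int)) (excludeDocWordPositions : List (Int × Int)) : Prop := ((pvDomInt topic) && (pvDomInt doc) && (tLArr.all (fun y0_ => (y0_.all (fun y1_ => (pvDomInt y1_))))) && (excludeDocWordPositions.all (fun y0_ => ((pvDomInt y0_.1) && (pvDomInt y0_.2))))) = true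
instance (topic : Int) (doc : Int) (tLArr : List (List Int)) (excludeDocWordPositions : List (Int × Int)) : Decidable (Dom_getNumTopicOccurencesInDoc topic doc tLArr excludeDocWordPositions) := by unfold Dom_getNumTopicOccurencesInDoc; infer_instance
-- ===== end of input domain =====

-- B replaces A's single guarded index scan by an inclusion–exclusion decomposition:
-- count all topic occurrences in the row, then subtract the deduplicated, validated
-- exclusions (objective: alternative decomposition, same asymptotic cost).

-- ===== PORT A =====
-- A: one pass over the word positions, counting positions holding `topic`
-- that are not listed in excludeDocWordPositions.
def getNumTopicOccurencesInDoc (topic : Int) (doc : Int) (tLArr : List (List Int)) (excludeDocWordPositions : List (Int × Int)) : Int :=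
  match PySem.List.pyGet? tLArr doc with
  | none => 0  -- Python raises IndexError here; excluded by Pre_
  | some row =>
    (List.range row.length).foldl
      (fun (num : Int) (p : Nat) =>
        if PySem.List.pyGet? row (p : Int) = some topic then
          if (doc, (p : Int)) ∈ excludeDocWordPositions then num else num + 1
        else num) 0

-- ===== PORT B =====
-- B: total occurrences in the row, minus the distinct exclusion entries that
-- actually name a topic-occurrence of this doc.
def getNumTopicOccurencesInDoc_alt (topic : Int) (doc : Int) (tLArr : List (List Int)) (excludeDocWordPositions : List (Int × Int)) : Int :=
  match PySem.List.pyGet? tLArr doc with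
  | none => 0  -- Python raises IndexError here; excluded by Pre_
  | some row =>
    let total : Int := ((row.filter (fun x => x == topic)).length : Int)
    let n : Int := (row.length : Int)
    let adjust : Int :=
      (((PySem.Set.ofList excludeDocWordPositions).filter
          (fun q => q.1 == doc && (decide (0 ≤ q.2) && decide (q.2 < n)) &&
                    (PySem.List.pyGet? row q.2 == some topic))).length : Int)
    total - adjust

-- ===== PRECONDITION & SPEC =====
-- Pre_ excludes exactly the inputs where Python A raises IndexError on tLArr[doc].
def Pre_getNumTopicOccurencesInDoc (topic : Int) (doc : Int) (tLArr : List (List Int)) (excludeDocWordPositions : List (Int × Int)) : Prop :=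
  PySem.Raise.InRange tLArr.length doc
instance (topic : Int) (doc : Int) (tLArr : List (List Int)) (excludeDocWordPositions : List (Int × Int)) : Decidable (Pre_getNumTopicOccurencesInDoc topic doc tLArr excludeDocWordPositions) := by unfold Pre_getNumTopicOccurencesInDoc; infer_instance
def pvWitness_getNumTopicOccurencesInDoc : Int × Int × List (List Int) × (List (Int × Int)) := (1, 0, [[1, 2, 1]], [(0, 0)])

def Spec_getNumTopicOccurencesInDoc (topic : Int) (doc : Int) (tLArr : List (List Int)) (excludeDocWordPositions : List (Int × Int)) (out : Int) : Prop := out = getNumTopicOccurencesInDoc_alt topic doc tLArr excludeDocWordPositions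
instance (topic : Int) (doc : Int) (tLArr : List (List Int)) (excludeDocWordPositions : List (Int × Int)) (out : Int) : Decidable (Spec_getNumTopicOccurencesInDoc topic doc tLArr excludeDocWordPositions out) := by unfold Spec_getNumTopicOccurencesInDoc; infer_instance

-- ===== CLAIM (what is proved, stated in full; the proofs are below) =====
def Claim_equal_getNumTopicOccurencesInDoc : Prop := ∀ (topic : Int) (doc : Int) (tLArr : List (List Int)) (excludeDocWordPositions : List (Int × Int)), Dom_getNumTopicOccurencesInDoc topic doc tLArr excludeDocWordPositions → Pre_getNumTopicOccurencesInDoc topic doc tLArr excludeDocWordPositions → Spec_getNumTopicOccurencesInDoc topic doc tLArr excludeDocWordPositions (getNumTopicOccurencesInDoc topic doc tLArr excludeDocWordPositions)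

-- ===== LEMMAS AND PROOFS =====

-- counting by value equals counting by index
lemma countP_eq_countP_range (topic : Int) (l : List Int) :
    l.countP (fun x => x == topic)
      = (List.range l.length).countP (fun (p : Nat) => l[p]? == some topic) := by
  induction l with
  | nil => simp
  | cons a l ih =>
      simp only [List.length_cons, List.range_succ_eq_map, List.countP_cons,
        List.countP_map]
      rw [ih]
      have h2 : ((fun (p : Nat) => (a :: l)[p]? == some topic) ∘ Nat.succ)
          = (fun (p : Nat) => l[p]? == some topic) := by
        funext p; simp
      rw [h2]
      by_cases h : a == topic <;> simp [h]

-- flipping one false position to true adds exactly 1 to the count over range n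
lemma countP_range_update (p p' : ℕ → Bool) (k n : ℕ) (hk : k < n)
    (hag : ∀ j, j ≠ k → p' j = p j) (hk1 : p' k = true) (hk0 : p k = false) :
    (List.range n).countP p' = (List.range n).countP p + 1 := by
  induction n with
  | zero => omega
  | succ n ih =>
      rw [List.range_succ, List.countP_append, List.countP_append]
      by_cases hkn : k = n
      · have heq : (List.range n).countP p' = (List.range n).countP p :=
          List.countP_congr (fun j hj => by
            have hj' : j ≠ k := by have := List.mem_range.mp hj; omega
            rw [hag j hj'])
        subst hkn
        simp [heq, hk1, hk0]
      · have hne : n ≠ k := fun h => hkn h.symm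
        rw [ih (by omega)]
        simp only [List.countP_singleton, hag n hne]
        omega

-- the deduplicated-exclusion count equals the index-wise "excluded occurrence" count
lemma countS (topic doc : Int) (row : List Int) (S : List (Int × Int)) (hnd : S.Nodup) :
    S.countP (fun q => q.1 == doc && (decide (0 ≤ q.2) && decide (q.2 < (row.length : Int))) &&
        (PySem.List.pyGet? row q.2 == some topic))
      = (List.range row.length).countP
          (fun (p : Nat) => (row[p]? == some topic) && decide ((doc, (p : Int)) ∈ S)) := by
  induction S with
  | nil => simp
  | cons q T ih =>
      rcases List.nodup_cons.mp hnd with ⟨hqT, hT⟩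
      rw [List.countP_cons, ih hT]
      by_cases hq : (q.1 == doc && (decide (0 ≤ q.2) && decide (q.2 < (row.length : Int))) &&
          (PySem.List.pyGet? row q.2 == some topic)) = true
      · -- q names a valid excluded occurrence: index k := q.2.toNat flips from false to true
        simp only [Bool.and_eq_true, beq_iff_eq, decide_eq_true_eq] at hq
        obtain ⟨⟨h1, h2, h3⟩, h4⟩ := hq
        set k := q.2.toNat with hkdef
        have hkq : (k : Int) = q.2 := Int.toNat_of_nonneg h2
        have hkn : k < row.length := by omega
        have hupd := countP_range_update
          (fun (p : Nat) => (row[p]? == some topic) && decide ((doc, (p : Int)) ∈ T))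
          (fun (p : Nat) => (row[p]? == some topic) && decide ((doc, (p : Int)) ∈ q :: T))
          k row.length hkn
          (fun j hj => by
            simp only [List.mem_cons]
            have hne : ¬ ((doc, (j : Int)) = q) := by
              intro h
              apply hj
              have : (j : Int) = q.2 := by rw [← h]
              omega
            simp [hne])
          (by
            have hget : row[k]? = some topic := by
              rw [← h4, ← hkq, PySem.List.pyGet?_natCast]
            have hmem : (doc, (k : Int)) ∈ q :: T := by
              rw [hkq, ← h1]
              exact List.mem_cons_self
            simp [hget, hmem])
          (by
            have hnm : ¬ ((doc, (k : Int)) ∈ T) := by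
              rw [hkq, ← h1]; exact hqT
            simp [hnm])
        rw [hupd]
        simp only [Bool.and_eq_true, beq_iff_eq, decide_eq_true_eq]
        rw [if_pos ⟨⟨h1, h2, h3⟩, h4⟩]
      · -- q is not a valid excluded occurrence: it never matches any counted index
        rw [if_neg hq]
        have : (List.range row.length).countP
            (fun (p : Nat) => (row[p]? == some topic) && decide ((doc, (p : Int)) ∈ q :: T))
            = (List.range row.length).countP
            (fun (p : Nat) => (row[p]? == some topic) && decide ((doc, (p : Int)) ∈ T)) := by
          apply List.countP_congr
          intro p hp
          have hpn : p < row.length := List.mem_range.mp hp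
          by_cases ht : (row[p]? == some topic) = true
          · have hne : ¬ ((doc, (p : Int)) = q) := by
              intro h
              apply hq
              have h1 : q.1 = doc := by rw [← h]
              have h2 : q.2 = (p : Int) := by rw [← h]
              simp only [Bool.and_eq_true, beq_iff_eq, decide_eq_true_eq]
              refine ⟨⟨h1, by omega, by omega⟩, ?_⟩
              rw [h2, PySem.List.pyGet?_natCast]
              simpa using ht
            simp [ht, List.mem_cons, hne]
          · simp [Bool.and_eq_true] at ht ⊢
            intro h; exact absurd h ht
        rw [this]; omega

-- splitting a count by a second predicate
lemma countP_split (t m : ℕ → Bool) (l : List ℕ) :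
    l.countP (fun p => t p && !(m p)) + l.countP (fun p => t p && m p)
      = l.countP t := by
  induction l with
  | nil => simp
  | cons a l ih =>
      simp only [List.countP_cons]
      by_cases ht : t a = true <;> by_cases hm : m a = true <;>
        simp [ht, hm] <;> omega

-- ===== VERDICT (by name: the statement is the Claim_ definition above) =====
theorem getNumTopicOccurencesInDoc_spec : Claim_equal_getNumTopicOccurencesInDoc := by
  intro topic doc tLArr ex _hDom hPre
  unfold Spec_getNumTopicOccurencesInDoc
  unfold getNumTopicOccurencesInDoc getNumTopicOccurencesInDoc_alt
  cases hrow : PySem.List.pyGet? tLArr doc with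
  | none =>
      exact absurd ((PySem.List.pyGet?_eq_none_iff tLArr doc).mp hrow) (not_not.mpr hPre)
  | some row =>
      simp only
      -- A's fold as a count
      have hfun : (fun (num : Int) (p : Nat) =>
          if PySem.List.pyGet? row (p : Int) = some topic then
            if (doc, (p : Int)) ∈ ex then num else num + 1
          else num)
          = (fun (num : Int) (p : Nat) =>
              if ((row[p]? == some topic) && !(decide ((doc, (p : Int)) ∈ ex))) = true
              then num + 1 else num) := by
        funext num p
        rw [PySem.List.pyGet?_natCast]
        by_cases h1 : row[p]? = some topic <;> by_cases h2 : (doc, (p : Int)) ∈ ex <;>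
          simp [h1, h2]
      rw [hfun, PySem.List.foldl_count_if]
      -- B's pieces as counts
      have htot := countP_eq_countP_range topic row
      have hadj := countS topic doc row (PySem.Set.ofList ex)
        (PySem.Set.nodup_ofList ex)
      have hmem : (List.range row.length).countP
          (fun (p : Nat) => (row[p]? == some topic) && decide ((doc, (p : Int)) ∈ PySem.Set.ofList ex))
          = (List.range row.length).countP
          (fun (p : Nat) => (row[p]? == some topic) && decide ((doc, (p : Int)) ∈ ex)) := by
        apply List.countP_congr
        intro p _
        simp [PySem.Set.mem_ofList]
      have hsplit := countP_split (fun (p : Nat) => row[p]? == some topic)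
        (fun (p : Nat) => decide ((doc, (p : Int)) ∈ ex)) (List.range row.length)
      rw [List.countP_eq_length_filter] at htot hadj
      rw [hmem] at hadj
      rw [← htot, ← hadj] at hsplit
      simp only [zero_add]
      omega
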